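-- pv_equiv track=rewrite | github.com/Rehabilitative-asthmatic90/chimere-odo | knowledge/ingest_pipeline.py | _parse_llm_summary
-- ===== SOURCE A (Python) =====
-- def _parse_llm_summary(summary: str) -> tuple:
--     """Parse LLM summary into (title, resume_text, bullet_points).
--     Best-effort extraction — falls back gracefully.
--     """
--     lines = summary.strip().split("\n")
--     title = ""
--     resume_lines = []
--     bullets = []
--
--     for line in lines:
--         stripped = line.strip()
--         if not stripped:
--             continue
--         # Title: first line starting with # or first non-empty line
--         if not title:
--             title = stripped.lstrip("#").strip()
--             continue
--         if stripped.startswith(("- ", "* ", "• ")):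
--             bullets.append(stripped)
--         else:
--             resume_lines.append(stripped)
--
--     resume_text = "\n".join(resume_lines) if resume_lines else summary
--     return title, resume_text, bullets
-- ===== SOURCE B (Python) =====
-- def _parse_llm_summary(summary: str) -> tuple:
--     """Parse LLM summary into (title, resume_text, bullet_points).
--
--     Index-based two-directional scan over the stripped text: a forward
--     find('\n') scan locates the title line, then a backward rfind('\n')
--     scan classifies the remaining lines last-to-first (lists are built in
--     reverse and flipped once).  No split into a line list, no single
--     forward accumulator loop.
--     """
--     prefixes = ("- ", "* ", "• ")
--     body = summary.strip()
--     n = len(body)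
--
--     # forward scan for the title
--     title, pos = "", 0
--     while pos < n and not title:
--         nl = body.find("\n", pos)
--         end = nl if nl != -1 else n
--         title = body[pos:end].strip().lstrip("#").strip()
--         pos = end + 1
--
--     # backward scan of body[pos:n], classifying lines last-to-first
--     resume, bullets = [], []
--     end = n
--     while end > pos:
--         nl = body.rfind("\n", pos, end)
--         start = nl + 1 if nl != -1 else pos
--         t = body[start:end].strip()
--         if t:
--             if t.startswith(prefixes):
--                 bullets.append(t)
--             else:
--                 resume.append(t)
--         end = nl if nl != -1 else pos
--     resume.reverse()
--     bullets.reverse()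
--
--     return title, "\n".join(resume) if resume else summary, bullets
-- ===== Notes on version B (the rewrite author's own statement) =====
-- stated objective: alternative
-- what changed: A splits the text into a line list and classifies it with one forward loop carrying title/resume/bullets state; B never builds a line list: it scans the raw text by index, a forward find scan to locate the title line, then a backward rfind scan that classifies lines last-to-first, building both lists in reverse and flipping them once.
import Mathlib
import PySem

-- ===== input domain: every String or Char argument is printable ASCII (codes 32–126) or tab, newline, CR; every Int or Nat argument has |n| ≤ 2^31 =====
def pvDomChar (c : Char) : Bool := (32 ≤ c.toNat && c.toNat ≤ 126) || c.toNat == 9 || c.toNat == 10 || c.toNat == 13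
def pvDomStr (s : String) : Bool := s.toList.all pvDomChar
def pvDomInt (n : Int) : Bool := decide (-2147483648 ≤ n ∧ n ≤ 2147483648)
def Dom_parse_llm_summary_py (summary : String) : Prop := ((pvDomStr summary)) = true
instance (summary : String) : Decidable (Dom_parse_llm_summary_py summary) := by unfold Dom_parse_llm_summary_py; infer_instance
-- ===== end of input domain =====

-- B replaces A's split-into-lines + forward accumulator loop by two index scans over
-- the raw text (forward find('\n') for the title, backward rfind('\n') classifying
-- lines last-to-first, reversed once at the end); same result, same O(n) cost.


-- ===== PORT A =====
-- stripped.startswith(("- ", "* ", "• "))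
def pvIsBullet (s : String) : Bool :=
  PySem.Str.startswith s "- " || PySem.Str.startswith s "* " || PySem.Str.startswith s "• "
-- stripped.lstrip("#").strip()  (lstrip("#") = drop leading '#' chars; exact by hand)
def pvLstripHashStrip (s : String) : String :=
  PySem.Str.strip (String.ofList (s.toList.dropWhile (fun c => c == '#')))

-- the for-loop over lines with state (title, resume_lines, bullets)
def pvALoop : List String → String → List String → List String →
    String × List String × List String
  | [], title, resume, bullets => (title, resume, bullets)
  | l :: ls, title, resume, bullets =>
    let stripped := PySem.Str.strip l
    if stripped = "" then pvALoop ls title resume bullets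
    else if title = "" then pvALoop ls (pvLstripHashStrip stripped) resume bullets
    else if pvIsBullet stripped then pvALoop ls title resume (bullets ++ [stripped])
    else pvALoop ls title (resume ++ [stripped]) bullets

def parse_llm_summary_py (summary : String) : String × String × List String :=
  let lines := (PySem.Str.split? (PySem.Str.strip summary) "\n").getD []  -- sep "\n" ≠ "": split? is always some here
  let (title, resume_lines, bullets) := pvALoop lines "" [] []
  let resume_text := if resume_lines ≠ [] then PySem.Str.join "\n" resume_lines else summary
  (title, resume_text, bullets)

-- ===== PORT B =====
-- char-level forms of the same literals (B works by index on the raw text)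
def pvIsBulletC (s : List Char) : Bool :=
  PySem.Chars.startswith s "- ".toList || PySem.Chars.startswith s "* ".toList ||
    PySem.Chars.startswith s "• ".toList
-- line.strip().lstrip('#').strip()
def pvHashTitleC (s : List Char) : List Char :=
  PySem.Chars.strip ((PySem.Chars.strip s).dropWhile (fun c => c == '#'))

-- s.find('\n', pos) ported by hand (exact): index of first '\n' in the dropped suffix
def pvFindNl : List Char → Option Nat
  | [] => none
  | c :: cs => if c = '\n' then some 0 else (pvFindNl cs).map (· + 1)

-- s.rfind('\n', pos, end) ported by hand (exact): index of last '\n' in the segment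
def pvRFindNl : List Char → Option Nat
  | [] => none
  | c :: cs =>
    match pvRFindNl cs with
    | some k => some (k + 1)
    | none => if c = '\n' then some 0 else none

theorem pvRFindNl_lt {cs : List Char} {k : Nat} (h : pvRFindNl cs = some k) : k < cs.length := by
  induction cs generalizing k with
  | nil => simp [pvRFindNl] at h
  | cons c cs ih =>
    simp only [pvRFindNl] at h
    cases hr : pvRFindNl cs with
    | some k' => rw [hr] at h; cases h; exact Nat.succ_lt_succ (ih hr)
    | none =>
      rw [hr] at h
      by_cases hc : c = '\n'
      · rw [if_pos hc] at h
        injection h with h; subst h; simp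
      · rw [if_neg hc] at h; cases h

-- forward scan for the title: while pos < n and not title
def pvTitleLoop (body : List Char) (pos : Nat) : List Char × Nat :=
  if h : pos < body.length then
    let k := (pvFindNl (body.drop pos)).getD (body.length - pos)
    let e := pos + k                                   -- end = nl if nl != -1 else n
    let t := pvHashTitleC ((body.drop pos).take (e - pos))   -- body[pos:end] (nonneg slice)
    if t = [] then pvTitleLoop body (e + 1) else (t, e + 1)
  else ([], pos)
termination_by body.length - pos
decreasing_by omega

-- backward scan: while end > pos, classify body[start:end], then end = nl (or pos)
def pvClassLoop (body : List Char) (pos e : Nat) (resume bullets : List (List Char)) :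
    List (List Char) × List (List Char) :=
  if _h : pos < e then
    let seg := (body.drop pos).take (e - pos)
    let nl? := pvRFindNl seg
    let start := match nl? with | some k => pos + k + 1 | none => pos
    let t := PySem.Chars.strip ((body.drop start).take (e - start))  -- body[start:end].strip()
    let rb :=
      if t = [] then (resume, bullets)
      else if pvIsBulletC t then (resume, bullets ++ [t])
      else (resume ++ [t], bullets)
    let e' := match nl? with | some k => pos + k | none => pos
    pvClassLoop body pos e' rb.1 rb.2
  else (resume, bullets)
termination_by e
decreasing_by
  cases hnl : pvRFindNl ((body.drop pos).take (e - pos)) with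
  | some k =>
    have hk := pvRFindNl_lt hnl
    rw [List.length_take, List.length_drop] at hk
    simp only [hnl]
    omega
  | none => simp only [hnl]; omega

def parse_llm_summary_py_alt (summary : String) : String × String × List String :=
  let body := PySem.Chars.strip summary.toList       -- body = summary.strip()
  let (title, pos) := pvTitleLoop body 0
  let (r, b) := pvClassLoop body pos body.length [] []
  let resume := r.reverse                            -- resume.reverse()
  let bullets := b.reverse                           -- bullets.reverse()
  let resume_text :=
    if resume ≠ [] then String.ofList (PySem.Chars.join "\n".toList resume) else summary
  (String.ofList title, resume_text, bullets.map String.ofList)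

-- ===== PRECONDITION & SPEC =====
def Spec_parse_llm_summary_py (summary : String) (out : String × String × List String) : Prop := out = parse_llm_summary_py_alt summary
instance (summary : String) (out : String × String × List String) : Decidable (Spec_parse_llm_summary_py summary out) := by unfold Spec_parse_llm_summary_py; infer_instance

-- ===== CLAIM =====
def Claim_equal_parse_llm_summary_py : Prop := ∀ (summary : String), Dom_parse_llm_summary_py summary → Spec_parse_llm_summary_py summary (parse_llm_summary_py summary)

-- ===== LEMMAS AND PROOFS =====

-- A's loop over stripped non-empty items (what remains after the blank-skip branch)
def pvCore : List String → String → List String → List String →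
    String × List String × List String
  | [], title, resume, bullets => (title, resume, bullets)
  | s :: ss, title, resume, bullets =>
    if title = "" then pvCore ss (pvLstripHashStrip s) resume bullets
    else if pvIsBullet s then pvCore ss title resume (bullets ++ [s])
    else pvCore ss title (resume ++ [s]) bullets

def pvFindTitle : List String → String × List String
  | [] => ("", [])
  | x :: xs =>
    let t := pvLstripHashStrip x
    if t = "" then pvFindTitle xs else (t, xs)

theorem pvALoop_eq_core (ls : List String) (t : String) (r b : List String) :
    pvALoop ls t r b = pvCore ((ls.map PySem.Str.strip).filter (fun l => l ≠ "")) t r b := by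
  induction ls generalizing t r b with
  | nil => rfl
  | cons l ls ih =>
    simp only [pvALoop, List.map_cons, List.filter_cons]
    by_cases h : PySem.Str.strip l = "" <;> simp [h, pvCore, ih]

theorem pvCore_of_title (ss : List String) (t : String) (r b : List String) (ht : t ≠ "") :
    pvCore ss t r b =
      (t, r ++ ss.filter (fun l => ¬ pvIsBullet l), b ++ ss.filter (fun l => pvIsBullet l)) := by
  induction ss generalizing r b with
  | nil => simp [pvCore]
  | cons s ss ih =>
    simp only [pvCore, if_neg ht]
    by_cases hb : pvIsBullet s <;> simp [hb, ih]

theorem pvCore_eq_findTitle (ss : List String) :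
    pvCore ss "" [] [] =
      (let (t, rest) := pvFindTitle ss;
       (t, rest.filter (fun l => ¬ pvIsBullet l), rest.filter (fun l => pvIsBullet l))) := by
  induction ss with
  | nil => rfl
  | cons s ss ih =>
    simp only [pvCore, pvFindTitle]
    by_cases h : pvLstripHashStrip s = ""
    · simpa [h] using ih
    · simp [h, pvCore_of_title ss _ [] [] h]

-- ---- char-level line structure ----
def pvConsHead (c : Char) : List (List Char) → List (List Char)
  | [] => [[c]]
  | h :: t => (c :: h) :: t

def pvLines : List Char → List (List Char)
  | [] => [[]]
  | c :: cs => if c = '\n' then [] :: pvLines cs else pvConsHead c (pvLines cs)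

def pvMapFirst (f : List Char → List Char) : List (List Char) → List (List Char)
  | [] => []
  | h :: t => f h :: t

def pvCItems (cs : List Char) : List (List Char) :=
  ((pvLines cs).map PySem.Chars.strip).filter (fun l => l ≠ [])

def pvCFindTitle : List (List Char) → List Char × List (List Char)
  | [] => ([], [])
  | x :: xs =>
    let t := PySem.Chars.strip (x.dropWhile (fun c => c == '#'))
    if t = [] then pvCFindTitle xs else (t, xs)

theorem pvLines_ne_nil (cs : List Char) : pvLines cs ≠ [] := by
  cases cs with
  | nil => simp [pvLines]
  | cons c cs =>
    simp only [pvLines]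
    split
    · simp
    · cases h : pvLines cs <;> simp [pvConsHead]

theorem go_spec (fuel : Nat) : ∀ (l cur : List Char) (acc : List (List Char)),
    l.length ≤ fuel →
    PySem.Chars.splitOn.go ['\n'] fuel l cur acc
      = acc.reverse ++ pvMapFirst (fun h => cur.reverse ++ h) (pvLines l) := by
  induction fuel with
  | zero =>
    intro l cur acc hl
    have : l = [] := by cases l <;> simp_all
    subst this
    simp [PySem.Chars.splitOn.go, pvLines, pvMapFirst]
  | succ fuel ih =>
    intro l cur acc hl
    cases l with
    | nil => simp [PySem.Chars.splitOn.go, pvLines, pvMapFirst]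
    | cons c rest =>
      rw [PySem.Chars.splitOn.go]
      by_cases hc : c = '\n'
      · subst hc
        have hpre : List.isPrefixOf ['\n'] ('\n' :: rest) = true := by simp [List.isPrefixOf]
        rw [if_pos hpre, show List.drop ['\n'].length ('\n' :: rest) = rest from rfl]
        rw [ih rest [] _ (by simpa using Nat.le_of_succ_le_succ hl)]
        cases hr : pvLines rest with
        | nil => exact absurd hr (pvLines_ne_nil rest)
        | cons h t => simp [pvLines, pvMapFirst, hr]
      · have hpre : List.isPrefixOf ['\n'] (c :: rest) = false := by
          simp [List.isPrefixOf]; exact fun h => absurd h.symm hc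
        rw [if_neg (by simp [hpre])]
        rw [ih rest (c :: cur) acc (by simpa using Nat.le_of_succ_le_succ hl)]
        cases hr : pvLines rest with
        | nil => exact absurd hr (pvLines_ne_nil rest)
        | cons h t => simp [pvLines, pvMapFirst, hr, hc, pvConsHead]

theorem splitOn_eq_pvLines (cs : List Char) :
    PySem.Chars.splitOn cs ['\n'] = pvLines cs := by
  rw [PySem.Chars.splitOn, go_spec (cs.length + 1) cs [] [] (by omega)]
  cases hr : pvLines cs with
  | nil => exact absurd hr (pvLines_ne_nil cs)
  | cons h t => simp [pvMapFirst]


-- ---- find/rfind vs pvLines ----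
theorem pvFindNl_none {cs : List Char} (h : pvFindNl cs = none) : pvLines cs = [cs] := by
  induction cs with
  | nil => rfl
  | cons c cs ih =>
    simp only [pvFindNl] at h
    by_cases hc : c = '\n'
    · simp [hc] at h
    · rw [if_neg hc] at h
      cases hf : pvFindNl cs with
      | some k => rw [hf] at h; simp at h
      | none => simp [pvLines, hc, ih hf, pvConsHead]

theorem pvFindNl_some {cs : List Char} {k : Nat} (h : pvFindNl cs = some k) :
    k < cs.length ∧ pvLines cs = cs.take k :: pvLines (cs.drop (k + 1)) := by
  induction cs generalizing k with
  | nil => simp [pvFindNl] at h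
  | cons c cs ih =>
    simp only [pvFindNl] at h
    by_cases hc : c = '\n'
    · rw [if_pos hc] at h
      injection h with h; subst h
      subst hc
      simp [pvLines]
    · rw [if_neg hc] at h
      cases hf : pvFindNl cs with
      | none => rw [hf] at h; simp at h
      | some k' =>
        rw [hf] at h; simp at h
        subst h
        obtain ⟨hlt, hl⟩ := ih hf
        refine ⟨by simpa using Nat.succ_lt_succ hlt, ?_⟩
        simp [pvLines, hc, hl, pvConsHead]

theorem pvRFindNl_none {cs : List Char} (h : pvRFindNl cs = none) : pvLines cs = [cs] := by
  induction cs with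
  | nil => rfl
  | cons c cs ih =>
    simp only [pvRFindNl] at h
    cases hr : pvRFindNl cs with
    | some k => rw [hr] at h; simp at h
    | none =>
      rw [hr] at h
      by_cases hc : c = '\n'
      · simp [hc] at h
      · simp [pvLines, hc, ih hr, pvConsHead]

theorem pvConsHead_append (c : Char) (X : List (List Char)) (y : List Char) (hX : X ≠ []) :
    pvConsHead c (X ++ [y]) = pvConsHead c X ++ [y] := by
  cases X with
  | nil => exact absurd rfl hX
  | cons h t => simp [pvConsHead]

theorem pvRFindNl_some {cs : List Char} {k : Nat} (h : pvRFindNl cs = some k) :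
    pvLines cs = pvLines (cs.take k) ++ [cs.drop (k + 1)] := by
  induction cs generalizing k with
  | nil => simp [pvRFindNl] at h
  | cons c cs ih =>
    simp only [pvRFindNl] at h
    cases hr : pvRFindNl cs with
    | some k' =>
      rw [hr] at h
      injection h with h; subst h
      rw [show (c :: cs).take (k' + 1) = c :: cs.take k' from rfl,
          show (c :: cs).drop (k' + 1 + 1) = cs.drop (k' + 1) from rfl]
      by_cases hc : c = '\n'
      · simp [pvLines, hc, ih hr]
      · simp only [pvLines, if_neg hc, ih hr]
        exact pvConsHead_append c _ _ (pvLines_ne_nil _)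
    | none =>
      rw [hr] at h
      by_cases hc : c = '\n'
      · rw [if_pos hc] at h
        injection h with h; subst h
        subst hc
        simp [pvLines, pvRFindNl_none hr]
      · rw [if_neg hc] at h; cases h

theorem pvCItems_nil : pvCItems [] = [] := by decide

-- ---- the backward classify loop computes the two filters, reversed ----
theorem pvCItems_append_last (u : List Char) {seg : List Char} {k : Nat}
    (h : pvRFindNl seg = some k) (hu : u = seg.drop (k + 1)) :
    pvCItems seg =
      pvCItems (seg.take k) ++ (if PySem.Chars.strip u = [] then [] else [PySem.Chars.strip u]) := by
  subst hu
  simp only [pvCItems, pvRFindNl_some h, List.map_append, List.filter_append]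
  by_cases hs : PySem.Chars.strip (seg.drop (k + 1)) = [] <;> simp [hs]

theorem classLoop_spec (body : List Char) : ∀ (e pos : Nat) (r b : List (List Char)),
    pvClassLoop body pos e r b =
      (r ++ ((pvCItems ((body.drop pos).take (e - pos))).filter (fun t => ¬ pvIsBulletC t)).reverse,
       b ++ ((pvCItems ((body.drop pos).take (e - pos))).filter (fun t => pvIsBulletC t)).reverse) := by
  intro e
  induction e using Nat.strong_induction_on with
  | _ e ih =>
    intro pos r b
    rw [pvClassLoop]
    by_cases h : pos < e
    · rw [dif_pos h]
      cases hnl : pvRFindNl ((body.drop pos).take (e - pos)) with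
      | none =>
        -- no newline in the segment: one line, then the loop ends (e' = pos)
        simp only [hnl]
        rw [pvClassLoop, dif_neg (lt_irrefl pos)]
        have hitems : pvCItems ((body.drop pos).take (e - pos)) =
            (if PySem.Chars.strip ((body.drop pos).take (e - pos)) = [] then []
             else [PySem.Chars.strip ((body.drop pos).take (e - pos))]) := by
          simp only [pvCItems, pvRFindNl_none hnl]
          by_cases hs : PySem.Chars.strip ((body.drop pos).take (e - pos)) = [] <;> simp [hs]
        rw [hitems]
        by_cases hs : PySem.Chars.strip ((body.drop pos).take (e - pos)) = []
        · simp [hs]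
        · by_cases hb : pvIsBulletC (PySem.Chars.strip ((body.drop pos).take (e - pos))) <;>
            simp [hs, hb]
      | some k =>
        -- split the segment at its last newline; recurse on the front part
        have hk := pvRFindNl_lt hnl
        rw [List.length_take, List.length_drop] at hk
        have hseg : (body.drop (pos + k + 1)).take (e - (pos + k + 1)) =
            ((body.drop pos).take (e - pos)).drop (k + 1) := by
          rw [List.drop_take, List.drop_drop]; congr 1; omega
        have hseg' : (body.drop pos).take (pos + k - pos) =
            ((body.drop pos).take (e - pos)).take k := by
          rw [List.take_take]; congr 1; omega
        simp only [hnl]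
        rw [ih (pos + k) (by omega)]
        rw [pvCItems_append_last _ hnl hseg, ← hseg']
        by_cases hs : PySem.Chars.strip ((body.drop (pos + k + 1)).take (e - (pos + k + 1))) = []
        · simp [hs]
        · by_cases hb :
              pvIsBulletC (PySem.Chars.strip ((body.drop (pos + k + 1)).take (e - (pos + k + 1)))) <;>
            simp [hs, hb, List.filter_append, List.reverse_append]
    · rw [dif_neg h]
      have h0 : e - pos = 0 := by omega
      simp [h0, pvCItems_nil]

-- ---- the forward title loop computes pvCFindTitle over the items ----
theorem pvCFindTitle_cons (x : List Char) (xs : List (List Char)) :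
    pvCFindTitle (x :: xs) =
      if PySem.Chars.strip (x.dropWhile (fun c => c == '#')) = [] then pvCFindTitle xs
      else (PySem.Chars.strip (x.dropWhile (fun c => c == '#')), xs) := rfl

theorem pvHashTitleC_eq (s : List Char) :
    PySem.Chars.strip ((PySem.Chars.strip s).dropWhile (fun c => c == '#')) = pvHashTitleC s := rfl

theorem pvHashTitleC_of_strip_nil {s : List Char} (h : PySem.Chars.strip s = []) :
    pvHashTitleC s = [] := by
  rw [pvHashTitleC, h]; rfl

theorem titleLoop_spec (body : List Char) : ∀ (n pos : Nat), body.length - pos = n →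
    (pvTitleLoop body pos).1 = (pvCFindTitle (pvCItems (body.drop pos))).1 ∧
    pvCItems (body.drop (pvTitleLoop body pos).2) = (pvCFindTitle (pvCItems (body.drop pos))).2 := by
  intro n
  induction n using Nat.strong_induction_on with
  | _ n ih =>
    intro pos hn
    by_cases hp : pos < body.length
    · rw [pvTitleLoop, dif_pos hp]
      cases hf : pvFindNl (body.drop pos) with
      | none =>
        -- no newline: the whole remaining text is one line, the loop then stops
        simp only [Option.getD_none]
        have hline : (body.drop pos).take (pos + (body.length - pos) - pos) = body.drop pos := by
          rw [show pos + (body.length - pos) - pos = body.length - pos by omega]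
          exact List.take_of_length_le (by simp)
        rw [hline]
        have hdrop2 : body.drop (pos + (body.length - pos) + 1) = [] :=
          List.drop_eq_nil_of_le (by omega)
        have hitems : pvCItems (body.drop pos) =
            (if PySem.Chars.strip (body.drop pos) = [] then []
             else [PySem.Chars.strip (body.drop pos)]) := by
          simp only [pvCItems, pvFindNl_none hf]
          by_cases hs : PySem.Chars.strip (body.drop pos) = [] <;> simp [hs]
        by_cases ht : pvHashTitleC (body.drop pos) = []
        · rw [if_pos ht]
          rw [pvTitleLoop, dif_neg (by omega : ¬ pos + (body.length - pos) + 1 < body.length)]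
          by_cases hs : PySem.Chars.strip (body.drop pos) = []
          · simp [hitems, hs, pvCFindTitle, hdrop2, pvCItems_nil]
          · simp [hitems, hs, pvCFindTitle_cons, pvHashTitleC_eq, ht, pvCFindTitle,
              hdrop2, pvCItems_nil]
        · rw [if_neg ht]
          have hs : PySem.Chars.strip (body.drop pos) ≠ [] :=
            fun h => ht (pvHashTitleC_of_strip_nil h)
          simp [hitems, hs, pvCFindTitle_cons, pvHashTitleC_eq, ht, hdrop2, pvCItems_nil]
      | some k =>
        simp only [Option.getD_some]
        obtain ⟨hk, hLines⟩ := pvFindNl_some hf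
        rw [List.length_drop] at hk
        rw [show pos + k - pos = k by omega]
        have hdrop2 : body.drop (pos + k + 1) = (body.drop pos).drop (k + 1) := by
          rw [List.drop_drop]; congr 1
        have hitems : pvCItems (body.drop pos) =
            (if PySem.Chars.strip ((body.drop pos).take k) = [] then []
             else [PySem.Chars.strip ((body.drop pos).take k)]) ++
              pvCItems ((body.drop pos).drop (k + 1)) := by
          simp only [pvCItems, hLines]
          by_cases hs : PySem.Chars.strip ((body.drop pos).take k) = [] <;> simp [hs]
        by_cases ht : pvHashTitleC ((body.drop pos).take k) = []
        · rw [if_pos ht]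
          have hrec := ih (body.length - (pos + k + 1)) (by omega) (pos + k + 1) rfl
          rw [hdrop2] at hrec
          by_cases hs : PySem.Chars.strip ((body.drop pos).take k) = []
          · rw [hitems, if_pos hs, List.nil_append]
            exact hrec
          · rw [hitems, if_neg hs, List.singleton_append]
            rw [pvCFindTitle_cons, pvHashTitleC_eq, if_pos ht]
            exact hrec
        · rw [if_neg ht]
          have hs : PySem.Chars.strip ((body.drop pos).take k) ≠ [] :=
            fun h => ht (pvHashTitleC_of_strip_nil h)
          rw [hitems, if_neg hs, List.singleton_append]
          rw [pvCFindTitle_cons, pvHashTitleC_eq, if_neg ht]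
          exact ⟨rfl, by rw [hdrop2]⟩
    · rw [pvTitleLoop, dif_neg hp]
      have hd : body.drop pos = [] := List.drop_eq_nil_of_le (by omega)
      simp [hd, pvCItems_nil, pvCFindTitle]

-- ---- string/char bridges ----
theorem ofList_eq_empty_iff (l : List Char) : String.ofList l = "" ↔ l = [] := by
  constructor
  · intro h; have := congrArg String.toList h; simpa using this
  · rintro rfl; rfl

theorem strStrip_ofList (l : List Char) :
    PySem.Str.strip (String.ofList l) = String.ofList (PySem.Chars.strip l) := by
  simp [PySem.Str.strip]

theorem pvIsBullet_ofList (t : List Char) : pvIsBullet (String.ofList t) = pvIsBulletC t := by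
  simp [pvIsBullet, pvIsBulletC]

theorem pvLstripHashStrip_ofList (x : List Char) :
    pvLstripHashStrip (String.ofList x) =
      String.ofList (PySem.Chars.strip (x.dropWhile (fun c => c == '#'))) := by
  simp [pvLstripHashStrip, PySem.Str.strip]

theorem pvFindTitle_map (l : List (List Char)) :
    pvFindTitle (l.map String.ofList) =
      (String.ofList (pvCFindTitle l).1, (pvCFindTitle l).2.map String.ofList) := by
  induction l with
  | nil => simp [pvFindTitle, pvCFindTitle]
  | cons x xs ih =>
    simp only [List.map_cons, pvFindTitle, pvCFindTitle_cons, pvLstripHashStrip_ofList]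
    by_cases h : PySem.Chars.strip (x.dropWhile (fun c => c == '#')) = []
    · simp [h, ih]
    · simp [h]

theorem filter_ne_empty_map (ls : List (List Char)) :
    ((ls.map String.ofList).map PySem.Str.strip).filter (fun l => l ≠ "") =
      ((ls.map PySem.Chars.strip).filter (fun l => l ≠ [])).map String.ofList := by
  induction ls with
  | nil => rfl
  | cons x xs ih =>
    simp only [List.map_cons, List.filter_cons, strStrip_ofList]
    by_cases h : PySem.Chars.strip x = [] <;>
      simpa [h, ofList_eq_empty_iff, ← List.map_map] using ih

theorem filter_not_bullet_map (X : List (List Char)) :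
    (X.map String.ofList).filter (fun l => ¬ pvIsBullet l) =
      (X.filter (fun t => ¬ pvIsBulletC t)).map String.ofList := by
  induction X with
  | nil => rfl
  | cons x xs ih =>
    simp only [List.map_cons, List.filter_cons, pvIsBullet_ofList]
    by_cases h : pvIsBulletC x <;> simpa [h, ← List.map_map] using ih

theorem filter_bullet_map (X : List (List Char)) :
    (X.map String.ofList).filter (fun l => pvIsBullet l) =
      (X.filter (fun t => pvIsBulletC t)).map String.ofList := by
  induction X with
  | nil => rfl
  | cons x xs ih =>
    simp only [List.map_cons, List.filter_cons, pvIsBullet_ofList]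
    by_cases h : pvIsBulletC x <;> simpa [h, ← List.map_map] using ih

theorem join_map (X : List (List Char)) :
    PySem.Str.join "\n" (X.map String.ofList) =
      String.ofList (PySem.Chars.join "\n".toList X) := by
  have hco : (String.toList ∘ String.ofList) = id := funext fun l => by simp
  simp [PySem.Str.join, List.map_map, hco]

theorem lines_eq (summary : String) :
    (PySem.Str.split? (PySem.Str.strip summary) "\n").getD [] =
      (pvLines (PySem.Chars.strip summary.toList)).map String.ofList := by
  have h1 : ("\n" : String).toList = ['\n'] := rfl
  simp [PySem.Str.split?, PySem.Chars.split?, PySem.Str.strip, h1,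
    splitOn_eq_pvLines]

theorem take_drop_len {α : Type} (l : List α) (p : Nat) :
    (l.drop p).take (l.length - p) = l.drop p :=
  List.take_of_length_le (by simp)

-- ===== VERDICT =====
theorem parse_llm_summary_py_spec : Claim_equal_parse_llm_summary_py := by
  intro summary _
  unfold Spec_parse_llm_summary_py parse_llm_summary_py parse_llm_summary_py_alt
  rcases hT : pvCFindTitle (pvCItems (PySem.Chars.strip summary.toList)) with ⟨T, rest⟩
  have hTitle := titleLoop_spec (PySem.Chars.strip summary.toList) _ 0 rfl
  rw [List.drop_zero, hT] at hTitle
  obtain ⟨hT1, hT2⟩ := hTitle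
  have hClass := classLoop_spec (PySem.Chars.strip summary.toList)
      (PySem.Chars.strip summary.toList).length
      (pvTitleLoop (PySem.Chars.strip summary.toList) 0).2 [] []
  rw [take_drop_len, hT2] at hClass
  have hcore := pvCore_eq_findTitle ((pvCItems (PySem.Chars.strip summary.toList)).map String.ofList)
  rw [pvFindTitle_map, hT] at hcore
  have hitems : (((pvLines (PySem.Chars.strip summary.toList)).map String.ofList).map
        PySem.Str.strip).filter (fun l => l ≠ "") =
      (pvCItems (PySem.Chars.strip summary.toList)).map String.ofList := by
    rw [filter_ne_empty_map]; rfl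
  simp only [lines_eq, pvALoop_eq_core, hitems, hcore, hClass, hT1,
    List.nil_append, List.reverse_reverse, filter_not_bullet_map, filter_bullet_map,
    join_map, ne_eq, List.map_eq_nil_iff]
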